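-- pv_equiv track=rewrite | github.com/HugoVeron/tableau_to_excel | research.py | find_in_dic
-- ===== SOURCE A (Python) =====
-- def compare_list(list_1, list_2):
--     s = sum(i == j for i, j in zip(list_1, list_2))
--     return (s == len(list_1) == len(list_2) )
--
-- def find_in_dic(dic, list) :
--     bool = False
--     cle = -1
--     for key,valeur in dic.items() :
--         if (compare_list(list,valeur)) :
--             bool = True
--             cle = key
--     return(bool,cle)
-- ===== SOURCE B (Python) =====
-- def find_in_dic(dic, list):
--     for key, valeur in reversed(dic.items()):
--         if valeur == list:
--             return (True, key)
--     return (False, -1)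
-- ===== Notes on version B (the rewrite author's own statement) =====
-- stated objective: simpler
-- what changed: B drops compare_list and the found-flag/accumulator: it scans the dict items in reverse and returns (True, key) at the first plain `valeur == list` match, else (False, -1), since the last forward match is the first reverse match.
import Mathlib
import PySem

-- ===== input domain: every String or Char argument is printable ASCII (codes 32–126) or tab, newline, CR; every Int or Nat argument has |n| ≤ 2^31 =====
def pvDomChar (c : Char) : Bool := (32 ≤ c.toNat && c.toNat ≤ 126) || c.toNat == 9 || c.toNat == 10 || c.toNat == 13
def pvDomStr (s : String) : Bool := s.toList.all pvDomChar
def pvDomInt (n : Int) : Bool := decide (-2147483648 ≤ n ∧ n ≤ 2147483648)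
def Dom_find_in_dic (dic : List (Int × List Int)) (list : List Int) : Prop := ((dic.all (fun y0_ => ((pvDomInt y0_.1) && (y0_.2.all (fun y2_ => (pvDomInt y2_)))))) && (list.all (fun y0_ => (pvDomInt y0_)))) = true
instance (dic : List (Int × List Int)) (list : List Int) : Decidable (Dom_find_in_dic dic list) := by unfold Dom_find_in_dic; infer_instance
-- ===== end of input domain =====

-- B scans the items in reverse, returning at the first match; A keeps a flag and the last matching key.

-- ===== PORT A =====
-- sum(i == j for i, j in zip(list_1, list_2)); s == len(list_1) == len(list_2)
def compare_list (list_1 list_2 : List Int) : Bool :=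
  let s : Int := (list_1.zip list_2).foldl (fun acc p => acc + (if p.1 = p.2 then 1 else 0)) 0
  decide (s = (list_1.length : Int) ∧ (list_1.length : Int) = (list_2.length : Int))

def find_in_dic (dic : List (Int × List Int)) (list : List Int) : Bool × Int :=
  dic.foldl (fun s p => if compare_list list p.2 then (true, p.1) else s) (false, -1)

-- ===== PORT B =====
-- the reversed(dic.items()) loop with early return
def findRevGo (list : List Int) : List (Int × List Int) → Bool × Int
  | [] => (false, -1)
  | p :: rest => if p.2 == list then (true, p.1) else findRevGo list rest

def find_in_dic_alt (dic : List (Int × List Int)) (list : List Int) : Bool × Int :=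
  findRevGo list dic.reverse

-- ===== PRECONDITION & SPEC =====
def Spec_find_in_dic (dic : List (Int × List Int)) (list : List Int) (out : Bool × Int) : Prop := out = find_in_dic_alt dic list
instance (dic : List (Int × List Int)) (list : List Int) (out : Bool × Int) : Decidable (Spec_find_in_dic dic list out) := by unfold Spec_find_in_dic; infer_instance

-- ===== CLAIM (what is proved, stated in full; the proofs are below) =====
def Claim_equal_find_in_dic : Prop := ∀ (dic : List (Int × List Int)) (list : List Int), Dom_find_in_dic dic list → Spec_find_in_dic dic list (find_in_dic dic list)

-- ===== LEMMAS AND PROOFS =====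

lemma pvFoldl_shift (ps : List (Int × Int)) (a : Int) :
    ps.foldl (fun acc p => acc + (if p.1 = p.2 then 1 else 0)) a
      = a + ps.foldl (fun acc p => acc + (if p.1 = p.2 then 1 else 0)) 0 := by
  induction ps generalizing a with
  | nil => simp
  | cons p ps ih =>
    simp only [List.foldl_cons]
    rw [ih (a + _), ih (0 + _)]
    ring

lemma pvFoldl_le (ps : List (Int × Int)) :
    ps.foldl (fun acc p => acc + (if p.1 = p.2 then 1 else 0)) 0 ≤ (ps.length : Int) := by
  induction ps with
  | nil => simp
  | cons p ps ih =>
    simp only [List.foldl_cons, List.length_cons]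
    rw [pvFoldl_shift]
    split_ifs <;> push_cast <;> omega

lemma pvSum_iff (l v : List Int) :
    ((l.zip v).foldl (fun acc p => acc + (if p.1 = p.2 then 1 else 0)) 0 = (l.length : Int)
      ∧ (l.length : Int) = (v.length : Int)) ↔ l = v := by
  induction l generalizing v with
  | nil =>
    cases v with
    | nil => simp
    | cons h t =>
      simp only [List.zip_nil_left, List.foldl_nil, List.length_nil, List.length_cons]
      constructor
      · rintro ⟨-, h2⟩; exfalso; push_cast at h2; omega
      · intro h'; exact absurd h' (by simp)
  | cons h t ih =>
    cases v with
    | nil =>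
      simp only [List.zip_nil_right, List.foldl_nil, List.length_cons, List.length_nil]
      constructor
      · rintro ⟨h1, -⟩; exfalso; push_cast at h1; omega
      · intro h'; exact absurd h' (by simp)
    | cons h' t' =>
      have hzip : (h :: t).zip (h' :: t') = (h, h') :: t.zip t' := rfl
      rw [hzip]
      simp only [List.foldl_cons, List.length_cons]
      rw [pvFoldl_shift]
      by_cases hh : h = h'
      · rw [if_pos hh]
        constructor
        · rintro ⟨h1, h2⟩
          have ht : t = t' := (ih t').mp (by push_cast at h1 h2 ⊢; omega)
          rw [hh, ht]
        · intro he
          injection he with he1 he2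
          have := (ih t').mpr he2
          obtain ⟨h1, h2⟩ := this
          constructor <;> push_cast at h1 h2 ⊢ <;> omega
      · rw [if_neg hh]
        constructor
        · rintro ⟨h1, -⟩
          exfalso
          have hle := pvFoldl_le (t.zip t')
          have hlen : (t.zip t').length = min t.length t'.length := List.length_zip
          push_cast at h1 hle
          omega
        · intro he; injection he with he1 he2; exact absurd he1 hh

lemma pvCmp_eq_beq (l v : List Int) : compare_list l v = (v == l) := by
  rw [Bool.eq_iff_iff]
  simp only [compare_list, decide_eq_true_eq, beq_iff_eq]
  rw [pvSum_iff]
  exact eq_comm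

lemma pvGo_none (list : List Int) (xs : List (Int × List Int))
    (h : ∀ p ∈ xs, (p.2 == list) = false) : findRevGo list xs = (false, -1) := by
  induction xs with
  | nil => rfl
  | cons p rest ih =>
    simp only [findRevGo, h p (by simp)]
    exact ih fun q hq => h q (by simp [hq])

lemma pvMain (list : List Int) (dic : List (Int × List Int)) (acc : Bool × Int) :
    dic.foldl (fun s p => if compare_list list p.2 then (true, p.1) else s) acc
      = if dic.any (fun p => p.2 == list) then findRevGo list dic.reverse else acc := by
  induction dic using List.reverseRecOn generalizing acc with
  | nil => simp
  | append_singleton ys p ih =>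
    rw [List.foldl_append]
    simp only [List.foldl_cons, List.foldl_nil, List.reverse_append, List.reverse_cons,
      List.reverse_nil, List.nil_append, List.cons_append, List.any_append, List.any_cons,
      List.any_nil, findRevGo]
    rw [pvCmp_eq_beq]
    by_cases hm : p.2 = list
    · have hb : (p.2 == list) = true := by simp [hm]
      rw [hb]
      simp
    · have hb : (p.2 == list) = false := by simp [hm]
      rw [hb]
      simp only [Bool.or_false, if_false, Bool.false_eq_true]
      exact ih acc

-- ===== VERDICT (by name: the statement is the Claim_ definition above) =====
theorem find_in_dic_spec : Claim_equal_find_in_dic := by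
  intro dic list _
  show find_in_dic dic list = find_in_dic_alt dic list
  unfold find_in_dic find_in_dic_alt
  rw [pvMain]
  split_ifs with h
  · rfl
  · symm
    apply pvGo_none
    intro p hp
    by_contra hb
    apply h
    rw [List.any_eq_true]
    exact ⟨p, List.mem_reverse.mp hp, by simpa using hb⟩
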